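-- pv_equiv track=rewrite | github.com/selfreferencing/erdos-86-lean | Zeroless/exp45_weighted_entry.py | inverse_double_digit
-- ===== SOURCE A (Python) =====
-- def inverse_double_digit(d_out, carry_out):
--     """
--     Given output digit d_out and outgoing carry carry_out,
--     find all valid (d_in, carry_in) pairs.
--
--     Equation: 2 * d_in + carry_in = d_out + 10 * carry_out
--     """
--     target = d_out + 10 * carry_out
--     solutions = []
--
--     for carry_in in [0, 1]:
--         if (target - carry_in) % 2 == 0:
--             d_in = (target - carry_in) // 2
--             if 0 <= d_in <= 9:
--                 solutions.append((d_in, carry_in))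
--
--     return solutions
-- ===== SOURCE B (Python) =====
-- def inverse_double_digit(d_out, carry_out):
--     """Forward search: enumerate all 20 candidate (d_in, carry_in) pairs and
--     keep those satisfying the equation 2*d_in + carry_in == target."""
--     target = d_out + 10 * carry_out
--     return [(d, c) for d in range(10) for c in (0, 1) if 2 * d + c == target]
-- ===== Notes on version B (the rewrite author's own statement) =====
-- stated objective: alternative
-- what changed: Replaces A's inverse solving (subtract carry, check parity, floor-divide) with a forward enumeration of all 20 candidate (d_in, carry_in) pairs filtered by the defining equation 2*d_in + carry_in == target.
import Mathlib
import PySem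

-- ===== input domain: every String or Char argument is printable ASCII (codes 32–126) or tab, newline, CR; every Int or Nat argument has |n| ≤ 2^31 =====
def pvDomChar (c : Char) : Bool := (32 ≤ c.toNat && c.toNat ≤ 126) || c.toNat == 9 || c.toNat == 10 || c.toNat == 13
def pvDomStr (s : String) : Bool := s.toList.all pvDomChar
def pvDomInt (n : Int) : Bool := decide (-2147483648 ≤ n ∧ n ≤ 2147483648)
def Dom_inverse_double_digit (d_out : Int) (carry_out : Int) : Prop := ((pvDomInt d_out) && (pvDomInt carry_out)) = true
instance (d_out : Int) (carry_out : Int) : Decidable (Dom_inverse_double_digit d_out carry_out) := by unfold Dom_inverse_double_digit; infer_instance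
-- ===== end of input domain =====

-- B enumerates all 20 candidate pairs and filters by the equation instead of solving it; objective: alternative (same cost).
-- ===== PORT A =====
-- Literal port of A: target, then fold over carry_in ∈ [0,1] appending matching pairs.
def inverse_double_digit (d_out : Int) (carry_out : Int) : List (Int × Int) :=
  let target := d_out + 10 * carry_out
  [(0 : Int), 1].foldl (fun solutions carry_in =>
    if PySem.Int.mod (target - carry_in) 2 = 0 then
      let d_in := PySem.Int.floordiv (target - carry_in) 2
      if 0 ≤ d_in ∧ d_in ≤ 9 then solutions ++ [(d_in, carry_in)] else solutions
    else solutions) []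

-- ===== PORT B =====
-- Port of B: list comprehension = flatMap over range(10), inner filter over (0,1) by the equation.
def inverse_double_digit_alt (d_out : Int) (carry_out : Int) : List (Int × Int) :=
  let target := d_out + 10 * carry_out
  (PySem.List.pyRange 0 10 1).flatMap (fun d =>
    [(0 : Int), 1].filterMap (fun c => if 2 * d + c = target then some (d, c) else none))

-- ===== PRECONDITION & SPEC =====
def Spec_inverse_double_digit (d_out : Int) (carry_out : Int) (out : List (Int × Int)) : Prop := out = inverse_double_digit_alt d_out carry_out
instance (d_out : Int) (carry_out : Int) (out : List (Int × Int)) : Decidable (Spec_inverse_double_digit d_out carry_out out) := by unfold Spec_inverse_double_digit; infer_instance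

-- ===== CLAIM =====
def Claim_equal_inverse_double_digit : Prop := ∀ (d_out : Int) (carry_out : Int), Dom_inverse_double_digit d_out carry_out → Spec_inverse_double_digit d_out carry_out (inverse_double_digit d_out carry_out)

-- ===== LEMMAS AND PROOFS =====
-- Both programs depend on the input only through t = d_out + 10*carry_out; we
-- generalize t, split on 0 ≤ t ≤ 19 (decide the 20 cases) vs out of range (both empty).
theorem pv_core (t : Int) :
    ([(0 : Int), 1].foldl (fun solutions carry_in =>
      if PySem.Int.mod (t - carry_in) 2 = 0 then
        let d_in := PySem.Int.floordiv (t - carry_in) 2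
        if 0 ≤ d_in ∧ d_in ≤ 9 then solutions ++ [(d_in, carry_in)] else solutions
      else solutions) [])
    = (PySem.List.pyRange 0 10 1).flatMap (fun d =>
        [(0 : Int), 1].filterMap (fun c => if 2 * d + c = t then some (d, c) else none)) := by
  by_cases h : 0 ≤ t ∧ t ≤ 19
  · obtain ⟨h0, h1⟩ := h
    interval_cases t <;> decide
  · push Not at h
    refine Eq.trans (b := ([] : List (Int × Int))) ?_ ?_
    · simp only [List.foldl,
        PySem.Int.mod_eq_emod_of_pos (by omega : (0:Int) < 2),
        PySem.Int.floordiv_eq_ediv_of_pos (by omega : (0:Int) < 2)]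
      split_ifs <;> first | rfl | (exfalso; omega)
    · symm
      rw [List.flatMap_eq_nil_iff]
      intro d hd
      rw [PySem.List.mem_pyRange_one] at hd
      simp only [List.filterMap_cons, List.filterMap_nil]
      rw [if_neg (by omega), if_neg (by omega)]

-- ===== VERDICT =====
theorem inverse_double_digit_spec : Claim_equal_inverse_double_digit := by
  intro d_out carry_out _
  unfold Spec_inverse_double_digit inverse_double_digit inverse_double_digit_alt
  exact pv_core (d_out + 10 * carry_out)
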